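-- pv_equiv track=rewrite | github.com/kaled182/drivemaps | app/utils/normalize.py | linhas_para_enderecos
-- ===== SOURCE A (Python) =====
-- def linhas_para_enderecos(linhas):
--     """
--     Recebe uma lista de linhas (preenchidas), retorna lista de tuplas (endereco, numero_pacote)
--     Processa em blocos de 3 linhas:
--       bloco[0]: endereço
--       bloco[1]: descarta
--       bloco[2]: número do pacote
--     """
--     res = []
--     linhas = [l.strip() for l in linhas if l.strip()]
--     for i in range(0, len(linhas), 3):
--         bloco = linhas[i:i+3]
--         if len(bloco) == 3:
--             endereco = bloco[0]
--             numero_pacote = bloco[2]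
--             res.append((endereco, numero_pacote))
--     return res
-- ===== SOURCE B (Python) =====
-- def linhas_para_enderecos(linhas):
--     # Single pass: track position within the current block of 3 non-blank lines.
--     res = []
--     pos = 0
--     addr = None
--     for l in linhas:
--         s = l.strip()
--         if not s:
--             continue
--         if pos == 0:
--             addr = s
--         elif pos == 2:
--             res.append((addr, s))
--         pos = (pos + 1) % 3
--     return res
-- ===== Notes on version B (the rewrite author's own statement) =====
-- stated objective: simpler
-- what changed: A builds a cleaned list and then indexes it by a range(0,len,3) slicing loop; B is a single pass over the raw lines with a mod-3 position counter and a saved address, with no intermediate list and no slicing.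
import Mathlib
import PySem

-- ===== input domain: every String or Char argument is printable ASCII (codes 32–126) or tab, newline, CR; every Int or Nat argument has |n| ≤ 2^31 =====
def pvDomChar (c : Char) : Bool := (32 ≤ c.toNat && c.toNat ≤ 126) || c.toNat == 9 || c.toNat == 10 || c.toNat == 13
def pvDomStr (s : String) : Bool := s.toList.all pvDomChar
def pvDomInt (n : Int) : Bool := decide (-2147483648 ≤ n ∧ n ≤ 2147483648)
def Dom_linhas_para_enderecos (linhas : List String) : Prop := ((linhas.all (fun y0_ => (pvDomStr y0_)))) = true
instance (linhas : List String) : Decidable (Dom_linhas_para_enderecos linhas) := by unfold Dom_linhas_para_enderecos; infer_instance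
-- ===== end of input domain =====

-- B replaces A's clean-then-slice-by-index loop with a single pass over the raw lines
-- keeping a mod-3 position counter (objective: simpler, one traversal, no intermediate list).

-- ===== PORT A =====
-- loop body of A, over the cleaned list: bloco = clean[i:i+3]; if len == 3 append (bloco[0], bloco[2])
def pvStepA (clean : List String) (res : List (String × String)) (i : Int) : List (String × String) :=
  let bloco := PySem.List.slice clean (some i) (some (i + 3))
  if bloco.length = 3 then
    res ++ [(PySem.List.pyGetD bloco 0 "", PySem.List.pyGetD bloco 2 "")]
  else res

def linhas_para_enderecos (linhas : List String) : List (String × String) :=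
  -- linhas = [l.strip() for l in linhas if l.strip()]
  let clean := linhas.filterMap (fun l => if PySem.Str.strip l ≠ "" then some (PySem.Str.strip l) else none)
  (PySem.List.pyRange 0 (clean.length : Int) 3).foldl (pvStepA clean) []

-- ===== PORT B =====
-- one fold step of B; state = (res, pos, addr).  Python's `addr = None` is ported as the
-- initial string "" — exact, because addr is never read before pos has passed 0 (assignment).
def pvStepB (st : List (String × String) × Int × String) (l : String) : List (String × String) × Int × String :=
  let s := PySem.Str.strip l
  if s = "" then st
  else
    let res := st.1
    let pos := st.2.1
    let addr := st.2.2
    if pos = 0 then (res, PySem.Int.mod (pos + 1) 3, s)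
    else if pos = 2 then (res ++ [(addr, s)], PySem.Int.mod (pos + 1) 3, addr)
    else (res, PySem.Int.mod (pos + 1) 3, addr)

def linhas_para_enderecos_alt (linhas : List String) : List (String × String) :=
  (linhas.foldl pvStepB ([], 0, "")).1

-- ===== PRECONDITION & SPEC =====
def Spec_linhas_para_enderecos (linhas : List String) (out : List (String × String)) : Prop := out = linhas_para_enderecos_alt linhas
instance (linhas : List String) (out : List (String × String)) : Decidable (Spec_linhas_para_enderecos linhas out) := by unfold Spec_linhas_para_enderecos; infer_instance

-- ===== CLAIM (what is proved, stated in full; the proofs are below) =====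
def Claim_equal_linhas_para_enderecos : Prop := ∀ (linhas : List String), Dom_linhas_para_enderecos linhas → Spec_linhas_para_enderecos linhas (linhas_para_enderecos linhas)

-- ===== LEMMAS AND PROOFS =====

-- the common semantics both programs compute on the cleaned list: pairs (block[0], block[2]) of full 3-blocks
def pvBlocks : List String → List (String × String)
  | a :: _ :: c :: r => (a, c) :: pvBlocks r
  | _ => []

def pvClean (linhas : List String) : List String :=
  linhas.filterMap (fun l => if PySem.Str.strip l ≠ "" then some (PySem.Str.strip l) else none)

-- range(0, n, 3) peels its first element
theorem pvRange3_cons (n : Int) (h : 0 < n) :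
    PySem.List.pyRange 0 n 3 = 0 :: (PySem.List.pyRange 0 (n - 3) 3).map (· + 3) := by
  rw [PySem.List.pyRange_of_pos _ _ (by norm_num : (0:Int) < 3),
      PySem.List.pyRange_of_pos _ _ (by norm_num : (0:Int) < 3)]
  have h1 : (if (0:Int) < n then ((n - 0 + 3 - 1) / 3).toNat else 0)
      = (if (0:Int) < n - 3 then ((n - 3 - 0 + 3 - 1) / 3).toNat else 0) + 1 := by
    split_ifs <;> omega
  rw [h1, List.range_succ_eq_map]
  simp [List.map_map, Function.comp]
  intro k _
  ring

theorem pvALoop (cl : List String) :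
    ∀ res : List (String × String),
      (PySem.List.pyRange 0 (cl.length : Int) 3).foldl (pvStepA cl) res = res ++ pvBlocks cl := by
  induction hn : cl.length using Nat.strong_induction_on generalizing cl with
  | _ n IH =>
    match cl, hn with
    | [], rfl => simp [PySem.List.pyRange, pvBlocks]
    | [a], rfl =>
      intro res
      have h1 : ((List.length [a] : Nat) : Int) = 1 := by simp
      rw [h1, show PySem.List.pyRange 0 1 3 = [0] from by decide]
      simp only [List.foldl_cons, List.foldl_nil]
      unfold pvStepA
      rw [PySem.List.slice_toNat _ (by norm_num) (by norm_num)]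
      simp [pvBlocks]
    | [a, b], rfl =>
      intro res
      have h1 : ((List.length [a, b] : Nat) : Int) = 2 := by simp
      rw [h1, show PySem.List.pyRange 0 2 3 = [0] from by decide]
      simp only [List.foldl_cons, List.foldl_nil]
      unfold pvStepA
      rw [PySem.List.slice_toNat _ (by norm_num) (by norm_num)]
      simp [pvBlocks]
    | a :: b :: c :: r, rfl =>
      intro res
      have hlen : ((a :: b :: c :: r).length : Int) = (r.length : Int) + 3 := by
        simp; omega
      rw [hlen, pvRange3_cons _ (by omega)]
      simp only [List.foldl_cons, List.foldl_map]
      have hstep0 : pvStepA (a :: b :: c :: r) res 0 = res ++ [(a, c)] := by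
        unfold pvStepA
        rw [PySem.List.slice_toNat _ (by norm_num) (by norm_num)]
        simp [PySem.List.pyGetD, PySem.List.pyGet?, PySem.List.pyIdx?]
      rw [hstep0]
      have hcongr : List.foldl (fun res i => pvStepA (a :: b :: c :: r) res (i + 3))
            (res ++ [(a, c)]) (PySem.List.pyRange 0 ((r.length : Int) + 3 - 3) 3)
          = List.foldl (pvStepA r) (res ++ [(a, c)]) (PySem.List.pyRange 0 (r.length : Int) 3) := by
        rw [show (r.length : Int) + 3 - 3 = (r.length : Int) by ring]
        apply PySem.List.foldl_congr_mem
        intro acc i hi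
        have h0i : 0 ≤ i := ((PySem.List.mem_pyRange_iff_of_pos (by norm_num) i).mp hi).1
        unfold pvStepA
        have hsl : PySem.List.slice (a :: b :: c :: r) (some (i + 3)) (some (i + 3 + 3))
            = PySem.List.slice r (some i) (some (i + 3)) := by
          rw [PySem.List.slice_toNat _ (by omega) (by omega),
              PySem.List.slice_toNat _ (by omega) (by omega)]
          have e1 : (i + 3 + 3).toNat - (i + 3).toNat = (i + 3).toNat - i.toNat := by omega
          have e2 : (i + 3).toNat = i.toNat + 1 + 1 + 1 := by omega
          rw [e1, e2]
          simp [List.drop_succ_cons]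
        rw [hsl]
      rw [hcongr, IH r.length (by simp; omega) r rfl]
      simp [pvBlocks]

-- pvStepB factored: skip a blank, otherwise act on the stripped line
def pvStepB' (st : List (String × String) × Int × String) (s : String) : List (String × String) × Int × String :=
  let res := st.1
  let pos := st.2.1
  let addr := st.2.2
  if pos = 0 then (res, PySem.Int.mod (pos + 1) 3, s)
  else if pos = 2 then (res ++ [(addr, s)], PySem.Int.mod (pos + 1) 3, addr)
  else (res, PySem.Int.mod (pos + 1) 3, addr)

theorem pvSkip (linhas : List String) :
    ∀ st, linhas.foldl pvStepB st = (pvClean linhas).foldl pvStepB' st := by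
  induction linhas with
  | nil => intro st; simp [pvClean]
  | cons l t ih =>
    intro st
    by_cases h : PySem.Str.strip l = ""
    · have hc : pvClean (l :: t) = pvClean t := by simp [pvClean, h]
      rw [List.foldl_cons, show pvStepB st l = st from by simp [pvStepB, h], ih, hc]
    · have hc : pvClean (l :: t) = PySem.Str.strip l :: pvClean t := by simp [pvClean, h]
      rw [List.foldl_cons, show pvStepB st l = pvStepB' st (PySem.Str.strip l) from by
            simp [pvStepB, pvStepB', h], ih, hc, List.foldl_cons]

theorem pvBLoop (cl : List String) :
    ∀ (res : List (String × String)) (addr : String),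
      (cl.foldl pvStepB' (res, 0, addr)).1 = res ++ pvBlocks cl := by
  induction hn : cl.length using Nat.strong_induction_on generalizing cl with
  | _ n IH =>
    match cl, hn with
    | [], rfl => simp [pvBlocks]
    | [s], rfl => intro res addr; simp [pvStepB', pvBlocks]
    | [s, t], rfl =>
      intro res addr
      simp [pvStepB', pvBlocks]
    | s :: t :: u :: r, rfl =>
      intro res addr
      simp only [List.foldl_cons]
      rw [show pvStepB' (res, 0, addr) s = (res, 1, s) from by simp [pvStepB']]
      rw [show pvStepB' (res, 1, s) t = (res, 2, s) from by simp [pvStepB']]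
      rw [show pvStepB' (res, 2, s) u = (res ++ [(s, u)], 0, s) from by simp [pvStepB']]
      rw [IH r.length (by simp; omega) r rfl]
      simp [pvBlocks]

-- ===== VERDICT (by name: the statement is the Claim_ definition above) =====
theorem linhas_para_enderecos_spec : Claim_equal_linhas_para_enderecos := by
  intro linhas _
  unfold Spec_linhas_para_enderecos linhas_para_enderecos linhas_para_enderecos_alt
  rw [show (linhas.filterMap (fun l => if PySem.Str.strip l ≠ "" then some (PySem.Str.strip l) else none)) = pvClean linhas from rfl]
  rw [pvALoop (pvClean linhas) [], pvSkip linhas ([], 0, ""), pvBLoop (pvClean linhas) [] ""]
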